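-- pv_equiv track=rewrite | github.com/gigo-gigo/atcoder | abc/abc448/c.py | solve
-- ===== SOURCE A (Python) =====
-- def solve(A, Bs):
--     subA = sorted(A)[:6]
--
--     ans = []
--     for B in Bs:
--         X = []
--         for b in B:
--             if b in subA:
--                 subA.remove(b)
--                 X.append(b)
--         ans.append(min(subA))
--         for b in X:
--             subA.append(b)
--
--     return ans
-- ===== SOURCE B (Python) =====
-- def solve(A, Bs):
--     # Sort-and-merge: for each query, walk the sorted six-smallest prefix in
--     # order against the sorted query with a single merge scan, returning the
--     # first prefix element the query fails to cancel (early exit).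
--     subA = sorted(A)[:6]
--     ans = []
--     for B in Bs:
--         rest = sorted(B)
--         res = None
--         for a in subA:
--             while rest and rest[0] < a:
--                 rest = rest[1:]
--             if rest and rest[0] == a:
--                 rest = rest[1:]
--             else:
--                 res = a
--                 break
--         ans.append(res)
--     return ans
-- ===== Notes on version B (the rewrite author's own statement) =====
-- stated objective: alternative
-- what changed: Replaces A's per-query mutate-remove-and-restore scan of the six-smallest list with a sort-then-merge two-pointer walk: each query is sorted once and merged against the sorted six-smallest prefix in a single in-order scan that returns the first uncancelled prefix element (early exit), with no mutation/restore and no membership/remove scans.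
-- outside the precondition, e.g. on solve([5], [[5]]): A raises ValueError, B returns [None]
import Mathlib
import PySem

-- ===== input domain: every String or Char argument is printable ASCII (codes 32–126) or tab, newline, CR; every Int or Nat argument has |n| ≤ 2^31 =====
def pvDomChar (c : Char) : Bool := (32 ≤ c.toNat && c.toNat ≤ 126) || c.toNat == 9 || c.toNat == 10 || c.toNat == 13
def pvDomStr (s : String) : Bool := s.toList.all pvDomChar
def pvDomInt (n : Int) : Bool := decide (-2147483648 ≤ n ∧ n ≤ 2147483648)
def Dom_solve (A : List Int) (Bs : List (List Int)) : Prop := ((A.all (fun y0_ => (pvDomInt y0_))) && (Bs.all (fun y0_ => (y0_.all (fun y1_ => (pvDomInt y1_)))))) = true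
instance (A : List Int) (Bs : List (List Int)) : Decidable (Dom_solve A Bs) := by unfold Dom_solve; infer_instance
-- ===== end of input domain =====

-- B replaces A's per-query mutate/remove/restore of the six-smallest list by a
-- sort-then-merge scan: each query is sorted and merged in order against the
-- sorted six-smallest prefix, returning the first uncancelled element (alternative).


-- ===== PORT A =====
-- inner loop over B: state (subA, X); 'b in subA' → contains, 'subA.remove(b)' under that
-- guard is List.erase (PySem.List.remove?_eq_some_erase); min(subA) → min? (none = ValueError,
-- excluded by Pre_; getD 0 totalises).
def solve (A : List Int) (Bs : List (List Int)) : List Int :=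
  let subA0 := (PySem.List.sorted A (fun x => x) false).take 6
  (Bs.foldl (fun (st : List Int × List Int) B =>
      let inner := B.foldl (fun (p : List Int × List Int) b =>
          if p.1.contains b then (p.1.erase b, p.2 ++ [b]) else p) (st.1, [])
      (inner.1 ++ inner.2,
       st.2 ++ [(PySem.List.min? inner.1 (fun x => x)).getD 0])
    ) (subA0, [])).2

-- ===== PORT B =====
-- Source B's inner while 'while rest and rest[0] < a: rest = rest[1:]' is skipLt;
-- the 'for a in subA' loop with break/else is firstSurv (none = no survivor, i.e.
-- Source B appends None there — outside Pre_; getD 0 totalises the port).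
def skipLt (a : Int) : List Int → List Int
  | [] => []
  | x :: xs => if x < a then skipLt a xs else x :: xs

def firstSurv : List Int → List Int → Option Int
  | [], _ => none
  | a :: t, rest =>
    match skipLt a rest with
    | [] => some a
    | x :: xs => if x = a then firstSurv t xs else some a

def solve_alt (A : List Int) (Bs : List (List Int)) : List Int :=
  let subA := (PySem.List.sorted A (fun x => x) false).take 6
  Bs.foldl (fun ans B =>
      ans ++ [(firstSurv subA (PySem.List.sorted B (fun x => x) false)).getD 0]) []

-- ===== PRECONDITION & SPEC =====
-- Pre_ excludes exactly the inputs where Python A raises ValueError (min of an emptied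
-- remainder): some query B cancels every occurrence of the six smallest values.
def Pre_solve (A : List Int) (Bs : List (List Int)) : Prop :=
  ∀ B ∈ Bs, ∃ v ∈ (PySem.List.sorted A (fun x => x) false).take 6,
    B.count v < ((PySem.List.sorted A (fun x => x) false).take 6).count v
instance (A : List Int) (Bs : List (List Int)) : Decidable (Pre_solve A Bs) := by
  unfold Pre_solve; infer_instance
def pvWitness_solve : List Int × List (List Int) := ([1, 2, 3], [[1], [2, 3]])
def Spec_solve (A : List Int) (Bs : List (List Int)) (out : List Int) : Prop := out = solve_alt A Bs
instance (A : List Int) (Bs : List (List Int)) (out : List Int) : Decidable (Spec_solve A Bs out) := by unfold Spec_solve; infer_instance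

-- ===== CLAIM (what is proved, stated in full; the proofs are below) =====
def Claim_equal_solve : Prop := ∀ (A : List Int) (Bs : List (List Int)), Dom_solve A Bs → Pre_solve A Bs → Spec_solve A Bs (solve A Bs)

-- ===== LEMMAS AND PROOFS =====

-- A's inner loop, split into its two components (proof-side restatement).
def remAll (s : List Int) (B : List Int) : List Int :=
  match B with
  | [] => s
  | b :: bs => if b ∈ s then remAll (s.erase b) bs else remAll s bs

def pickAll (s : List Int) (B : List Int) : List Int :=
  match B with
  | [] => []
  | b :: bs => if b ∈ s then b :: pickAll (s.erase b) bs else pickAll s bs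

theorem innerFold_eq (B : List Int) (s X : List Int) :
    B.foldl (fun (p : List Int × List Int) b =>
      if p.1.contains b then (p.1.erase b, p.2 ++ [b]) else p) (s, X)
      = (remAll s B, X ++ pickAll s B) := by
  induction B generalizing s X with
  | nil => simp [remAll, pickAll]
  | cons b bs ih =>
    simp only [List.foldl_cons]
    by_cases h : b ∈ s
    · have hc : s.contains b = true := by simpa using h
      rw [if_pos hc, ih]
      simp [remAll, pickAll, h]
    · have hc : ¬ s.contains b = true := by simpa using h
      rw [if_neg hc, ih]
      simp [remAll, pickAll, h]

theorem count_remAll (s B : List Int) (v : Int) :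
    (remAll s B).count v = s.count v - min (s.count v) (B.count v) := by
  induction B generalizing s with
  | nil => simp [remAll]
  | cons b bs ih =>
    simp only [remAll]
    by_cases h : b ∈ s
    · rw [if_pos h, ih]
      by_cases hv : v = b
      · subst hv
        have h1 : (s.erase v).count v = s.count v - 1 := List.count_erase_self
        have hpos : 0 < s.count v := List.count_pos_iff.mpr h
        have h2 : (v :: bs).count v = bs.count v + 1 := List.count_cons_self
        omega
      · have h1 : (s.erase b).count v = s.count v := List.count_erase_of_ne hv
        have h2 : (b :: bs).count v = bs.count v := List.count_cons_of_ne (Ne.symm hv)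
        omega
    · rw [if_neg h, ih]
      by_cases hv : v = b
      · subst hv
        have h0 : s.count v = 0 := List.count_eq_zero.mpr h
        simp [h0]
      · have h2 : (b :: bs).count v = bs.count v := List.count_cons_of_ne (Ne.symm hv)
        omega

theorem count_restore (s B : List Int) (v : Int) :
    (remAll s B ++ pickAll s B).count v = s.count v := by
  induction B generalizing s with
  | nil => simp [remAll, pickAll]
  | cons b bs ih =>
    simp only [remAll, pickAll]
    by_cases h : b ∈ s
    · rw [if_pos h, if_pos h]
      have hrec := ih (s.erase b)
      simp only [List.count_append] at hrec ⊢
      by_cases hv : v = b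
      · subst hv
        have h1 : (s.erase v).count v = s.count v - 1 := List.count_erase_self
        have hpos : 0 < s.count v := List.count_pos_iff.mpr h
        have h2 : (v :: pickAll (s.erase v) bs).count v
            = (pickAll (s.erase v) bs).count v + 1 := List.count_cons_self
        omega
      · have h1 : (s.erase b).count v = s.count v := List.count_erase_of_ne hv
        have h2 : (b :: pickAll (s.erase b) bs).count v
            = (pickAll (s.erase b) bs).count v := List.count_cons_of_ne (Ne.symm hv)
        omega
    · rw [if_neg h, if_neg h]; exact ih s

theorem mem_remAll_iff (s B : List Int) (v : Int) :
    v ∈ remAll s B ↔ B.count v < s.count v := by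
  rw [← List.count_pos_iff, count_remAll]
  omega

-- skipLt facts
theorem skipLt_count (a v : Int) (hav : a ≤ v) (l : List Int) :
    (skipLt a l).count v = l.count v := by
  induction l with
  | nil => rfl
  | cons x xs ih =>
    simp only [skipLt]
    by_cases h : x < a
    · rw [if_pos h, ih, List.count_cons_of_ne]
      omega
    · rw [if_neg h]

theorem skipLt_sorted (a : Int) (l : List Int)
    (h : l.Pairwise (· ≤ ·)) : (skipLt a l).Pairwise (· ≤ ·) := by
  induction l with
  | nil => exact h
  | cons x xs ih =>
    simp only [skipLt]
    by_cases hx : x < a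
    · rw [if_pos hx]; exact ih (List.pairwise_cons.mp h).2
    · rw [if_neg hx]; exact h

theorem skipLt_head (a x : Int) (xs l : List Int)
    (h : skipLt a l = x :: xs) : a ≤ x := by
  induction l with
  | nil => simp [skipLt] at h
  | cons y ys ih =>
    simp only [skipLt] at h
    by_cases hy : y < a
    · rw [if_pos hy] at h; exact ih h
    · rw [if_neg hy] at h
      injection h with h1 _
      omega

theorem count_eq_zero_of_lt_head (a x : Int) (xs : List Int)
    (h : (x :: xs).Pairwise (· ≤ ·)) (hx : a < x) : (x :: xs).count a = 0 := by
  apply List.count_eq_zero.mpr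
  intro hmem
  rcases List.mem_cons.mp hmem with h1 | h1
  · omega
  · have := (List.pairwise_cons.mp h).1 a h1
    omega

-- no survivor: every value of S is fully cancelled by rest
theorem firstSurv_none (S rest : List Int) (hS : S.Pairwise (· ≤ ·))
    (h : firstSurv S rest = none) :
    ∀ v, S.count v ≤ rest.count v := by
  induction S generalizing rest with
  | nil => intro v; simp
  | cons a t ih =>
    intro v
    simp only [firstSurv] at h
    cases hsk : skipLt a rest with
    | nil => rw [hsk] at h; simp at h
    | cons x xs =>
      simp only [hsk] at h
      by_cases hxa : x = a
      · rw [if_pos hxa] at h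
        subst hxa
        have iht := ih xs (List.pairwise_cons.mp hS).2 h
        rcases lt_trichotomy v x with hv | hv | hv
        · have : (x :: t).count v = 0 := count_eq_zero_of_lt_head v x t hS hv
          omega
        · subst hv
          have hc : (skipLt v rest).count v = rest.count v := skipLt_count v v le_rfl rest
          rw [hsk] at hc
          have h2 : (v :: xs).count v = xs.count v + 1 := List.count_cons_self
          have h3 : (v :: t).count v = t.count v + 1 := List.count_cons_self
          have := iht v
          omega
        · have hc : (skipLt x rest).count v = rest.count v :=
            skipLt_count x v (le_of_lt hv) rest
          rw [hsk] at hc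
          have h2 : (x :: xs).count v = xs.count v := List.count_cons_of_ne (by omega)
          have h3 : (x :: t).count v = t.count v := List.count_cons_of_ne (by omega)
          have := iht v
          omega
      · rw [if_neg hxa] at h; simp at h

-- survivor m: the least value under-represented in rest relative to S
theorem firstSurv_some (S rest : List Int) (m : Int)
    (hS : S.Pairwise (· ≤ ·)) (hR : rest.Pairwise (· ≤ ·))
    (h : firstSurv S rest = some m) :
    rest.count m < S.count m ∧ ∀ v, rest.count v < S.count v → m ≤ v := by
  induction S generalizing rest with
  | nil => simp [firstSurv] at h
  | cons a t ih =>
    simp only [firstSurv] at h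
    have hmin0 : ∀ v, rest.count v < (a :: t).count v → a ≤ v := by
      intro v hv
      by_contra hva
      have : (a :: t).count v = 0 := count_eq_zero_of_lt_head v a t hS (by omega)
      omega
    cases hsk : skipLt a rest with
    | nil =>
      simp only [hsk] at h
      have hma : m = a := by injection h with h'; omega
      subst hma
      have hc : rest.count m = 0 := by
        have h1 := skipLt_count m m le_rfl rest
        rw [hsk] at h1
        simpa using h1.symm
      refine ⟨?_, hmin0⟩
      have : (m :: t).count m = t.count m + 1 := List.count_cons_self
      omega
    | cons x xs =>
      simp only [hsk] at h
      have hax : a ≤ x := skipLt_head a x xs rest hsk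
      by_cases hxa : x = a
      · rw [if_pos hxa] at h
        subst hxa
        have hRs : (x :: xs).Pairwise (· ≤ ·) := by
          rw [← hsk]; exact skipLt_sorted x rest hR
        obtain ⟨ih1, ih2⟩ := ih xs (List.pairwise_cons.mp hS).2
          (List.pairwise_cons.mp hRs).2 h
        -- m ∈ t hence x ≤ m
        have hmS : x ≤ m := by
          have : 0 < t.count m := by omega
          have hmem : m ∈ t := List.count_pos_iff.mp this
          exact (List.pairwise_cons.mp hS).1 m hmem
        have transfer : ∀ v, x ≤ v →
            (rest.count v < (x :: t).count v ↔ xs.count v < t.count v) := by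
          intro v hxv
          have hc : (skipLt x rest).count v = rest.count v := skipLt_count x v hxv rest
          rw [hsk] at hc
          by_cases hvx : v = x
          · subst hvx
            have h2 : (v :: xs).count v = xs.count v + 1 := List.count_cons_self
            have h3 : (v :: t).count v = t.count v + 1 := List.count_cons_self
            omega
          · have h2 : (x :: xs).count v = xs.count v := List.count_cons_of_ne (Ne.symm hvx)
            have h3 : (x :: t).count v = t.count v := List.count_cons_of_ne (Ne.symm hvx)
            omega
        refine ⟨(transfer m hmS).mpr ih1, ?_⟩
        intro v hv
        have hav : x ≤ v := hmin0 v hv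
        exact ih2 v ((transfer v hav).mp hv)
      · rw [if_neg hxa] at h
        have hma : m = a := by injection h with h'; omega
        subst hma
        have hRs : (x :: xs).Pairwise (· ≤ ·) := by
          rw [← hsk]; exact skipLt_sorted m rest hR
        have hc : rest.count m = 0 := by
          have h1 := skipLt_count m m le_rfl rest
          rw [hsk] at h1
          have h2 : (x :: xs).count m = 0 :=
            count_eq_zero_of_lt_head m x xs hRs (by omega)
          omega
        refine ⟨?_, hmin0⟩
        have : (m :: t).count m = t.count m + 1 := List.count_cons_self
        omega

-- min (id key) from a membership/minimality witness
theorem min?_id_eq_some (l : List Int) (m : Int)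
    (hmem : m ∈ l) (hmin : ∀ y ∈ l, m ≤ y) :
    PySem.List.min? l (fun x => x) = some m := by
  cases h : PySem.List.min? l (fun x => x) with
  | none =>
    have : l = [] := (PySem.List.min?_eq_none_iff _ _).mp h
    subst this; simp at hmem
  | some m' =>
    have h1 : m' ∈ l := PySem.List.min?_mem h
    have h2 : (m' : Int) ≤ m := PySem.List.min?_isMin h m hmem
    have h3 : m ≤ m' := hmin m' h1
    exact congrArg some (le_antisymm h2 h3)

-- the bridge: A's min of the cancelled remainder = B's merge-scan survivor
theorem min_remAll_eq_firstSurv (S subA B : List Int)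
    (hS : S.Pairwise (· ≤ ·))
    (hcnt : ∀ v, subA.count v = S.count v) :
    PySem.List.min? (remAll subA B) (fun x => x)
      = firstSurv S (PySem.List.sorted B (fun x => x) false) := by
  set sB := PySem.List.sorted B (fun x => x) false with hsB
  have hBcnt : ∀ v, sB.count v = B.count v := fun v =>
    (PySem.List.sorted_perm B (fun x => x) false).count_eq v
  have hmem : ∀ v, v ∈ remAll subA B ↔ sB.count v < S.count v := by
    intro v
    rw [mem_remAll_iff, hcnt v, hBcnt v]
  have hRs : sB.Pairwise (· ≤ ·) := PySem.List.sorted_pairwise B (fun x => x)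
  cases h : firstSurv S sB with
  | none =>
    have hall := firstSurv_none S sB hS h
    have : remAll subA B = [] := by
      apply List.eq_nil_iff_forall_not_mem.mpr
      intro v hv
      have := (hmem v).mp hv
      have := hall v
      omega
    rw [this]
    exact (PySem.List.min?_eq_none_iff _ _).mpr rfl
  | some m =>
    obtain ⟨h1, h2⟩ := firstSurv_some S sB m hS hRs h
    apply min?_id_eq_some
    · exact (hmem m).mpr h1
    · intro y hy
      exact h2 y ((hmem y).mp hy)

theorem solve_eq_alt (A : List Int) (Bs : List (List Int)) :
    solve A Bs = solve_alt A Bs := by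
  unfold solve solve_alt
  simp only [innerFold_eq, List.nil_append]
  generalize hG : (PySem.List.sorted A (fun x => x) false).take 6 = S
  have hS : S.Pairwise (· ≤ ·) := by
    rw [← hG]
    exact List.Pairwise.sublist (List.take_sublist 6 _)
      (PySem.List.sorted_pairwise A (fun x => x))
  suffices h : ∀ (subA : List Int) (acc : List Int),
      (∀ v, subA.count v = S.count v) →
      (Bs.foldl (fun (st : List Int × List Int) B =>
          (remAll st.1 B ++ pickAll st.1 B,
           st.2 ++ [(PySem.List.min? (remAll st.1 B) (fun x => x)).getD 0])) (subA, acc)).2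
      = Bs.foldl (fun ans B =>
          ans ++ [(firstSurv S (PySem.List.sorted B (fun x => x) false)).getD 0]) acc by
    exact h S [] (fun _ => rfl)
  induction Bs with
  | nil => intro subA acc _; rfl
  | cons B Bs ih =>
    intro subA acc hperm
    simp only [List.foldl_cons]
    rw [min_remAll_eq_firstSurv S subA B hS hperm]
    exact ih (remAll subA B ++ pickAll subA B) _
      (fun v => by rw [count_restore, hperm v])

-- ===== VERDICT (by name: the statement is the Claim_ definition above) =====
theorem solve_spec : Claim_equal_solve := by
  intro A Bs _ _
  unfold Spec_solve
  exact solve_eq_alt A Bs
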